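-- pv_equiv track=rewrite | github.com/davidlevien/research_agent | research_system/selection/domain_balance.py | get_domain_family
-- ===== SOURCE A (Python) =====
-- DOMAIN_FAMILIES = {
--     "nps": {"nps.gov", "npshistory.com"},
--     "usgs": {"usgs.gov"},
--     "gov": {"*.gov"},  # Wildcard for any .gov domain
--     "edu": {"*.edu"},  # Wildcard for any .edu domain
--     "econ": {"worldbank.org", "oecd.org", "imf.org", "wto.org", "bis.org"},
--     "eu": {"data.europa.eu", "ec.europa.eu", "eurostat.ec.europa.eu", "ecb.europa.eu"},
--     "un": {"un.org", "unctad.org", "who.int"},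
-- }
--
-- def get_domain_family(domain: str) -> str:
--     """Get the family name for a domain"""
--     for family_name, domains in DOMAIN_FAMILIES.items():
--         if domain in domains:
--             return family_name
--         # Check wildcards
--         for pattern in domains:
--             if pattern.startswith("*."):
--                 suffix = pattern[1:]
--                 if domain.endswith(suffix):
--                     return family_name
--     return domain  # Return the domain itself if no family found
-- ===== SOURCE B (Python) =====
-- _FAMILY_TABLE = [
--     ("nps", ["nps.gov", "npshistory.com"]),
--     ("usgs", ["usgs.gov"]),
--     ("gov", ["*.gov"]),
--     ("edu", ["*.edu"]),
--     ("econ", ["worldbank.org", "oecd.org", "imf.org", "wto.org", "bis.org"]),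
--     ("eu", ["data.europa.eu", "ec.europa.eu", "eurostat.ec.europa.eu", "ecb.europa.eu"]),
--     ("un", ["un.org", "unctad.org", "who.int"]),
-- ]
--
-- # Precomputed once: exact-domain -> family index, and ordered wildcard suffixes.
-- _EXACT = {}
-- _SUFFIXES = []
-- for _fam, _doms in _FAMILY_TABLE:
--     for _p in _doms:
--         if _p.startswith("*."):
--             _SUFFIXES.append((_p[1:], _fam))
--         else:
--             _EXACT.setdefault(_p, _fam)
--
-- def get_domain_family(domain: str) -> str:
--     """Get the family name for a domain"""
--     fam = _EXACT.get(domain)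
--     if fam is not None:
--         return fam
--     for suffix, fam in _SUFFIXES:
--         if domain.endswith(suffix):
--             return fam
--     return domain
-- ===== Notes on version B (the rewrite author's own statement) =====
-- stated objective: simpler
-- what changed: Replaces the nested family/pattern scan with two precomputed module-level structures: a flat exact-domain->family dict tried first, then an ordered (suffix, family) wildcard list; the per-call work is one dict lookup plus a two-entry suffix pass.
import Mathlib
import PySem

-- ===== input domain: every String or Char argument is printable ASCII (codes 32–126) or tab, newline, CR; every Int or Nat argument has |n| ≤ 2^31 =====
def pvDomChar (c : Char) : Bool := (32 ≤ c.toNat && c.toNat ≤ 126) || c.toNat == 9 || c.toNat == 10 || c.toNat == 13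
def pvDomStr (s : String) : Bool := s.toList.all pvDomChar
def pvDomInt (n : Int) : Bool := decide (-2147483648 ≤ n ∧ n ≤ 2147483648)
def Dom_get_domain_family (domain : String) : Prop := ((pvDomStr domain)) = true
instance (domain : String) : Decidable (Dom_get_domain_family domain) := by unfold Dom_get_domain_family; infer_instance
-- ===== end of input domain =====

-- B precomputes an exact-match map and an ordered wildcard suffix list instead of A's nested per-call scan (objective: simpler).

-- ===== PORT A =====
def famTable : List (String × PySem.Set String) :=
  [("nps", PySem.Set.ofList ["nps.gov", "npshistory.com"]),
   ("usgs", PySem.Set.ofList ["usgs.gov"]),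
   ("gov", PySem.Set.ofList ["*.gov"]),
   ("edu", PySem.Set.ofList ["*.edu"]),
   ("econ", PySem.Set.ofList ["worldbank.org", "oecd.org", "imf.org", "wto.org", "bis.org"]),
   ("eu", PySem.Set.ofList ["data.europa.eu", "ec.europa.eu", "eurostat.ec.europa.eu", "ecb.europa.eu"]),
   ("un", PySem.Set.ofList ["un.org", "unctad.org", "who.int"])]

-- inner 'for pattern in domains' loop (each set holds at most one wildcard, so set order cannot affect the result)
def wildScan (domain : String) : List String → Bool
  | [] => false
  | p :: ps =>
    if PySem.Str.startswith p "*." then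
      if PySem.Str.endswith domain (PySem.Str.slice p (some 1) none) then true
      else wildScan domain ps
    else wildScan domain ps

-- outer 'for family_name, domains in DOMAIN_FAMILIES.items()' loop
def famLoop (domain : String) : List (String × PySem.Set String) → String
  | [] => domain
  | (fam, doms) :: rest =>
    if PySem.Set.contains doms domain then fam
    else if wildScan domain doms then fam
    else famLoop domain rest

def get_domain_family (domain : String) : String :=
  famLoop domain famTable

-- ===== PORT B =====
def famTableB : List (String × List String) :=
  [("nps", ["nps.gov", "npshistory.com"]),
   ("usgs", ["usgs.gov"]),
   ("gov", ["*.gov"]),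
   ("edu", ["*.edu"]),
   ("econ", ["worldbank.org", "oecd.org", "imf.org", "wto.org", "bis.org"]),
   ("eu", ["data.europa.eu", "ec.europa.eu", "eurostat.ec.europa.eu", "ecb.europa.eu"]),
   ("un", ["un.org", "unctad.org", "who.int"])]

-- module-level builder of _EXACT (setdefault = insert only if absent)
def exactMap : PySem.Dict String String :=
  famTableB.foldl (fun d fd =>
    fd.2.foldl (fun d p =>
      if PySem.Str.startswith p "*." then d
      else if (PySem.Dict.get? d p).isSome then d else PySem.Dict.insert d p fd.1) d)
    PySem.Dict.empty

-- module-level builder of _SUFFIXES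
def suffixList : List (String × String) :=
  famTableB.foldl (fun acc fd =>
    fd.2.foldl (fun acc p =>
      if PySem.Str.startswith p "*." then acc ++ [(PySem.Str.slice p (some 1) none, fd.1)]
      else acc) acc)
    []

-- 'for suffix, fam in _SUFFIXES' loop
def suffixScan (domain : String) : List (String × String) → Option String
  | [] => none
  | (suf, fam) :: rest =>
    if PySem.Str.endswith domain suf then some fam else suffixScan domain rest

def get_domain_family_alt (domain : String) : String :=
  match PySem.Dict.get? exactMap domain with
  | some fam => fam
  | none =>
    match suffixScan domain suffixList with
    | some fam => fam
    | none => domain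

-- ===== PRECONDITION & SPEC =====
def Spec_get_domain_family (domain : String) (out : String) : Prop := out = get_domain_family_alt domain
instance (domain : String) (out : String) : Decidable (Spec_get_domain_family domain out) := by unfold Spec_get_domain_family; infer_instance

-- ===== CLAIM (what is proved, stated in full; the proofs are below) =====
def Claim_equal_get_domain_family : Prop := ∀ (domain : String), Dom_get_domain_family domain → Spec_get_domain_family domain (get_domain_family domain)

-- ===== LEMMAS AND PROOFS =====

-- ===== VERDICT (by name: the statement is the Claim_ definition above) =====
theorem get_domain_family_spec : Claim_equal_get_domain_family := by
  intro d _
  show get_domain_family d = get_domain_family_alt d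
  by_cases h1 : d = "nps.gov"
  · subst h1; decide
  by_cases h2 : d = "npshistory.com"
  · subst h2; decide
  by_cases h3 : d = "usgs.gov"
  · subst h3; decide
  by_cases h4 : d = "*.gov"
  · subst h4; decide
  by_cases h5 : d = "*.edu"
  · subst h5; decide
  by_cases h6 : d = "worldbank.org"
  · subst h6; decide
  by_cases h7 : d = "oecd.org"
  · subst h7; decide
  by_cases h8 : d = "imf.org"
  · subst h8; decide
  by_cases h9 : d = "wto.org"
  · subst h9; decide
  by_cases h10 : d = "bis.org"
  · subst h10; decide
  by_cases h11 : d = "data.europa.eu"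
  · subst h11; decide
  by_cases h12 : d = "ec.europa.eu"
  · subst h12; decide
  by_cases h13 : d = "eurostat.ec.europa.eu"
  · subst h13; decide
  by_cases h14 : d = "ecb.europa.eu"
  · subst h14; decide
  by_cases h15 : d = "un.org"
  · subst h15; decide
  by_cases h16 : d = "unctad.org"
  · subst h16; decide
  by_cases h17 : d = "who.int"
  · subst h17; decide
  have ht : famTable = [("nps", ["nps.gov", "npshistory.com"]), ("usgs", ["usgs.gov"]),
      ("gov", ["*.gov"]), ("edu", ["*.edu"]),
      ("econ", ["worldbank.org", "oecd.org", "imf.org", "wto.org", "bis.org"]),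
      ("eu", ["data.europa.eu", "ec.europa.eu", "eurostat.ec.europa.eu", "ecb.europa.eu"]),
      ("un", ["un.org", "unctad.org", "who.int"])] := rfl
  have hA : get_domain_family d =
      (if PySem.Str.endswith d ".gov" then "gov"
       else if PySem.Str.endswith d ".edu" then "edu" else d) := by
    simp only [get_domain_family, ht, famLoop]
    rw [show wildScan d ["nps.gov", "npshistory.com"] = false from rfl,
        show wildScan d ["usgs.gov"] = false from rfl,
        show wildScan d ["*.gov"] = (if PySem.Str.endswith d ".gov" then true else false) from rfl,
        show wildScan d ["*.edu"] = (if PySem.Str.endswith d ".edu" then true else false) from rfl,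
        show wildScan d ["worldbank.org", "oecd.org", "imf.org", "wto.org", "bis.org"] = false from rfl,
        show wildScan d ["data.europa.eu", "ec.europa.eu", "eurostat.ec.europa.eu", "ecb.europa.eu"] = false from rfl,
        show wildScan d ["un.org", "unctad.org", "who.int"] = false from rfl]
    simp [PySem.Set.contains, h1, h2, h3, h4, h5, h6, h7, h8, h9, h10, h11, h12, h13, h14, h15, h16, h17]
    split_ifs <;> rfl
  have hd : exactMap = PySem.Dict.mk [("nps.gov", "nps"), ("npshistory.com", "nps"),
      ("usgs.gov", "usgs"), ("worldbank.org", "econ"), ("oecd.org", "econ"), ("imf.org", "econ"),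
      ("wto.org", "econ"), ("bis.org", "econ"), ("data.europa.eu", "eu"), ("ec.europa.eu", "eu"),
      ("eurostat.ec.europa.eu", "eu"), ("ecb.europa.eu", "eu"), ("un.org", "un"),
      ("unctad.org", "un"), ("who.int", "un")] := rfl
  have hs : suffixList = [(".gov", "gov"), (".edu", "edu")] := rfl
  have hB : get_domain_family_alt d =
      (if PySem.Str.endswith d ".gov" then "gov"
       else if PySem.Str.endswith d ".edu" then "edu" else d) := by
    simp only [get_domain_family_alt, hd, hs, suffixScan]
    simp [PySem.Dict.get?_mk_cons, Ne.symm h1, Ne.symm h2, Ne.symm h3, Ne.symm h6, Ne.symm h7, Ne.symm h8, Ne.symm h9, Ne.symm h10, Ne.symm h11, Ne.symm h12, Ne.symm h13, Ne.symm h14, Ne.symm h15, Ne.symm h16, Ne.symm h17]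
    split_ifs <;> rfl
  rw [hA, hB]
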